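-- pv_equiv track=rewrite | github.com/adam147g/introduction-to-computer-science | Exercises/set 6/zestaw-6-zadanie-32.py | equal_sum_of_elements
-- ===== SOURCE A (Python) =====
-- def equal_sum_of_elements(T, k, summary=0, idx=0, count1=0, count2=0):
--     if summary == 0 and count1 + count2 == k:
--         return True
--     elif idx == len(T):
--         return False
--     return (equal_sum_of_elements(T, k, summary + T[idx], idx + 1, count1 + 1, count2) or
--             equal_sum_of_elements(T, k, summary - T[idx], idx + 1, count1, count2 + 1) or
--             equal_sum_of_elements(T, k, summary, idx + 1, count1, count2))
-- ===== SOURCE B (Python) =====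
-- def equal_sum_of_elements(T, k, summary=0, idx=0, count1=0, count2=0):
--     # Layered breadth-first set of reachable (signed-sum, picked-count) states per index.
--     states = {(summary, count1 + count2)}
--     for i in range(idx, len(T)):
--         if (0, k) in states:
--             return True
--         x = T[i]
--         states = {ns for (s, c) in states
--                   for ns in ((s + x, c + 1), (s - x, c + 1), (s, c))}
--     return (0, k) in states
-- ===== Notes on version B (the rewrite author's own statement) =====
-- stated objective: alternative
-- what changed: Replaces A's three-way branching recursion by an iterative layer-by-layer breadth-first search that keeps one deduplicated set of reachable (signed-sum, picked-count) states per index.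
import Mathlib
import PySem

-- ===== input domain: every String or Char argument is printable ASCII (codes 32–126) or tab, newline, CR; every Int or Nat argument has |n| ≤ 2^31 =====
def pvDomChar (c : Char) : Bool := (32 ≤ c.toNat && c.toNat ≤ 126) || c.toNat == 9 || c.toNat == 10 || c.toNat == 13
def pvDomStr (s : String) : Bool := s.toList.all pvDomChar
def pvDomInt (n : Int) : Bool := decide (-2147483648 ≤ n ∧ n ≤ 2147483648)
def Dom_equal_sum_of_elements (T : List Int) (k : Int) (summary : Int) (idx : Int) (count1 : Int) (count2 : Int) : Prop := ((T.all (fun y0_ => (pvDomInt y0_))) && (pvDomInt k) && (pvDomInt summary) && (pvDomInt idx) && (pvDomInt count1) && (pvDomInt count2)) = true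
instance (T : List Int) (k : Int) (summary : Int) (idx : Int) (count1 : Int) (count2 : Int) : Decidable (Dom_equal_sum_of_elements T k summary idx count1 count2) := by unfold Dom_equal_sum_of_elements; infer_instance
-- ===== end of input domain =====

-- B replaces A's three-way branching recursion by an iterative layer-by-layer breadth-first
-- search over one deduplicated set of reachable (signed-sum, picked-count) states per index
-- (objective: alternative -- a different traversal of the same state space).

-- ===== PORT A =====
def equal_sum_of_elements (T : List Int) (k : Int) (summary : Int) (idx : Int) (count1 : Int) (count2 : Int) : Bool :=
  if summary = 0 ∧ count1 + count2 = k then true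
  else if idx = (T.length : Int) then false
  else if h : PySem.Raise.InRange T.length idx then
    -- T[idx]; the dite guard only makes the recursion total: Python raises IndexError
    -- exactly when the guard fails (outside Pre_), and the recursion is unchanged.
    equal_sum_of_elements T k (summary + PySem.List.pyGetD T idx 0) (idx + 1) (count1 + 1) count2 ||
    equal_sum_of_elements T k (summary - PySem.List.pyGetD T idx 0) (idx + 1) count1 (count2 + 1) ||
    equal_sum_of_elements T k summary (idx + 1) count1 count2
  else false
termination_by ((T.length : Int) - idx).toNat
decreasing_by all_goals (simp [PySem.Raise.InRange] at h; omega)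

-- ===== PORT B =====
-- one step of B's loop body: early-exit flag, hit test, then the set comprehension
def esoeStep (T : List Int) (k : Int) (acc : Bool × PySem.Set (Int × Int)) (i : Int) : Bool × PySem.Set (Int × Int) :=
  if acc.1 then acc
  else if PySem.Set.contains acc.2 ((0 : Int), k) then (true, acc.2)
  else
    (false, PySem.Set.ofList (acc.2.flatMap (fun sc =>
      [(sc.1 + PySem.List.pyGetD T i 0, sc.2 + 1), (sc.1 - PySem.List.pyGetD T i 0, sc.2 + 1), sc])))
    -- pyGetD is T[i]; i is in range on every input Pre_ admits

def equal_sum_of_elements_alt (T : List Int) (k : Int) (summary : Int) (idx : Int) (count1 : Int) (count2 : Int) : Bool :=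
  let p := (PySem.List.pyRange idx (T.length : Int) 1).foldl (esoeStep T k)
    (false, PySem.Set.ofList [(summary, count1 + count2)])
  p.1 || PySem.Set.contains p.2 ((0 : Int), k)

-- ===== PRECONDITION & SPEC =====
-- Pre_ excludes exactly the inputs where Python A raises IndexError: an index more than
-- len(T) past either end, reached with the success base case not already satisfied.
def Pre_equal_sum_of_elements (T : List Int) (k : Int) (summary : Int) (idx : Int) (count1 : Int) (count2 : Int) : Prop :=
  (summary = 0 ∧ count1 + count2 = k) ∨ (-(T.length : Int) ≤ idx ∧ idx ≤ (T.length : Int))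
instance (T : List Int) (k : Int) (summary : Int) (idx : Int) (count1 : Int) (count2 : Int) : Decidable (Pre_equal_sum_of_elements T k summary idx count1 count2) := by unfold Pre_equal_sum_of_elements; infer_instance
def pvWitness_equal_sum_of_elements : List Int × Int × Int × Int × Int × Int := ([1, 2, 3], 2, 0, 0, 0, 0)

def Spec_equal_sum_of_elements (T : List Int) (k : Int) (summary : Int) (idx : Int) (count1 : Int) (count2 : Int) (out : Bool) : Prop := out = equal_sum_of_elements_alt T k summary idx count1 count2
instance (T : List Int) (k : Int) (summary : Int) (idx : Int) (count1 : Int) (count2 : Int) (out : Bool) : Decidable (Spec_equal_sum_of_elements T k summary idx count1 count2 out) := by unfold Spec_equal_sum_of_elements; infer_instance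

-- ===== CLAIM (what is proved, stated in full; the proofs are below) =====
def Claim_equal_equal_sum_of_elements : Prop := ∀ (T : List Int) (k : Int) (summary : Int) (idx : Int) (count1 : Int) (count2 : Int), Dom_equal_sum_of_elements T k summary idx count1 count2 → Pre_equal_sum_of_elements T k summary idx count1 count2 → Spec_equal_sum_of_elements T k summary idx count1 count2 (equal_sum_of_elements T k summary idx count1 count2)
-- ===== LEMMAS AND PROOFS =====

-- only the total picked count matters in A, not how it splits into count1/count2
theorem eso_count_merge (T : List Int) (k : Int) : ∀ (n : Nat) (s i c1 c2 : Int),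
    (((T.length : Int) - i).toNat = n) →
    equal_sum_of_elements T k s i c1 c2 = equal_sum_of_elements T k s i (c1 + c2) 0 := by
  intro n
  induction n using Nat.strong_induction_on with
  | _ n ih =>
    intro s i c1 c2 hn
    conv_lhs => rw [equal_sum_of_elements]
    conv_rhs => rw [equal_sum_of_elements]
    by_cases hb : s = 0 ∧ c1 + c2 = k
    · simp [hb]
    · have hb' : ¬ (s = 0 ∧ c1 + c2 + 0 = k) := by omega
      simp only [if_neg hb, if_neg hb']
      by_cases he : i = (T.length : Int)
      · simp [he]
      · simp only [if_neg he]
        by_cases hr : PySem.Raise.InRange T.length i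
        · simp only [dif_pos hr]
          have hm : (((T.length : Int) - (i + 1)).toNat) < n := by
            simp [PySem.Raise.InRange] at hr; omega
          rw [ih _ hm (s + PySem.List.pyGetD T i 0) (i+1) (c1+1) c2 rfl,
              ih _ hm (s - PySem.List.pyGetD T i 0) (i+1) c1 (c2+1) rfl,
              ih _ hm s (i+1) c1 c2 rfl,
              ih _ hm (s - PySem.List.pyGetD T i 0) (i+1) (c1+c2) (0+1) rfl]
          ring_nf
        · simp [dif_neg hr]

theorem eso_foldl_true (T : List Int) (k : Int) (l : List Int) (S : PySem.Set (Int × Int)) :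
    l.foldl (esoeStep T k) (true, S) = (true, S) := by
  induction l with
  | nil => rfl
  | cons x xs ih => simpa [esoeStep] using ih

theorem eso_loop (T : List Int) (k : Int) : ∀ (n : Nat) (i : Int), (((T.length : Int) - i).toNat = n) →
    -(T.length : Int) ≤ i →
    ∀ (S : PySem.Set (Int × Int)),
    (let p := (PySem.List.pyRange i (T.length : Int) 1).foldl (esoeStep T k) (false, S)
     p.1 || PySem.Set.contains p.2 ((0 : Int), k)) =
    S.any (fun sc => equal_sum_of_elements T k sc.1 i sc.2 0) := by
  intro n
  induction n using Nat.strong_induction_on with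
  | _ n ih =>
    intro i hn hlo S
    by_cases hend : (T.length : Int) ≤ i
    · -- empty range: result is the membership test; A from i ≥ len is just the base test
      rw [PySem.List.pyRange_one_eq_nil hend]
      simp only [List.foldl_nil]
      have hA : ∀ sc : Int × Int, equal_sum_of_elements T k sc.1 i sc.2 0 = decide (sc = ((0:Int), k)) := by
        intro sc
        rw [equal_sum_of_elements]
        by_cases hb : sc.1 = 0 ∧ sc.2 + 0 = k
        · have hsc : sc = ((0:Int), k) := by
            obtain ⟨a, b⟩ := sc; obtain ⟨h1, h2⟩ := hb; simp only [Prod.mk.injEq]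
            constructor <;> omega
          simp [hsc]
        · have h2 : ¬ sc = ((0:Int), k) := by rintro rfl; simp at hb
          have h3 : ¬ PySem.Raise.InRange T.length i := by simp [PySem.Raise.InRange]; omega
          simp only [if_neg hb, dif_neg h3]
          split <;> simp [h2]
      simp only [hA]
      rw [Bool.eq_iff_iff]
      simp only [PySem.Set.contains_eq_listContains, List.contains_eq_mem, List.any_eq_true,
        Bool.false_or, decide_eq_true_eq]
      constructor
      · intro h; exact ⟨_, h, rfl⟩
      · rintro ⟨x, hx, rfl⟩; exact hx
    · push_neg at hend
      rw [PySem.List.pyRange_one_cons hend]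
      simp only [List.foldl_cons]
      by_cases hc : PySem.Set.contains S ((0 : Int), k)
      · have hmem : ((0:Int), k) ∈ S := by simpa using hc
        have hst : esoeStep T k (false, S) i = (true, S) := by simp [esoeStep, hmem]
        rw [hst, eso_foldl_true]
        have hany : S.any (fun sc => equal_sum_of_elements T k sc.1 i sc.2 0) = true := by
          rw [List.any_eq_true]
          refine ⟨((0:Int), k), hmem, ?_⟩
          rw [equal_sum_of_elements]; simp
        simp [hany]
      · have hnmem : ((0:Int), k) ∉ S := by simpa using hc
        have hstep : esoeStep T k (false, S) i =
            (false, PySem.Set.ofList (S.flatMap (fun sc =>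
              [(sc.1 + PySem.List.pyGetD T i 0, sc.2 + 1), (sc.1 - PySem.List.pyGetD T i 0, sc.2 + 1), sc]))) := by
          simp [esoeStep, hnmem]
        rw [hstep]
        have hm : (((T.length : Int) - (i + 1)).toNat) < n := by omega
        rw [ih _ hm (i + 1) rfl (by omega)]
        have hAi : ∀ sc : Int × Int, sc ∈ S → equal_sum_of_elements T k sc.1 i sc.2 0 =
            (equal_sum_of_elements T k (sc.1 + PySem.List.pyGetD T i 0) (i + 1) (sc.2 + 1) 0 ||
             equal_sum_of_elements T k (sc.1 - PySem.List.pyGetD T i 0) (i + 1) (sc.2 + 1) 0 ||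
             equal_sum_of_elements T k sc.1 (i + 1) sc.2 0) := by
          intro sc hsc
          have hb : ¬ (sc.1 = 0 ∧ sc.2 + 0 = k) := by
            rintro ⟨h1, h2⟩
            apply hnmem
            have : sc = ((0:Int), k) := by
              obtain ⟨a, b⟩ := sc; simp only [Prod.mk.injEq]; constructor <;> omega
            rwa [this] at hsc
          have hr : PySem.Raise.InRange T.length i := by simp [PySem.Raise.InRange]; omega
          have hne : i ≠ (T.length : Int) := by omega
          conv_lhs => rw [equal_sum_of_elements]
          simp only [if_neg hb, if_neg hne, dif_pos hr]
          rw [eso_count_merge T k _ (sc.1 - PySem.List.pyGetD T i 0) (i+1) sc.2 (0+1) rfl]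
          ring_nf
        rw [Bool.eq_iff_iff, List.any_eq_true, List.any_eq_true]
        constructor
        · rintro ⟨t, ht, hA⟩
          rw [PySem.Set.mem_ofList, List.mem_flatMap] at ht
          obtain ⟨sc, hsc, ht3⟩ := ht
          refine ⟨sc, hsc, ?_⟩
          rw [hAi sc hsc]
          simp only [List.mem_cons, List.mem_singleton] at ht3
          rcases ht3 with rfl | rfl | rfl | h
          · simp [hA]
          · simp [hA]
          · simp [hA]
          · cases h
        · rintro ⟨sc, hsc, hA⟩
          rw [hAi sc hsc] at hA
          simp only [Bool.or_eq_true] at hA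
          rcases hA with (h1 | h2) | h3
          · refine ⟨(sc.1 + PySem.List.pyGetD T i 0, sc.2 + 1), ?_, h1⟩
            rw [PySem.Set.mem_ofList, List.mem_flatMap]
            exact ⟨sc, hsc, by simp⟩
          · refine ⟨(sc.1 - PySem.List.pyGetD T i 0, sc.2 + 1), ?_, h2⟩
            rw [PySem.Set.mem_ofList, List.mem_flatMap]
            exact ⟨sc, hsc, by simp⟩
          · refine ⟨sc, ?_, h3⟩
            rw [PySem.Set.mem_ofList, List.mem_flatMap]
            exact ⟨sc, hsc, by simp⟩

theorem eso_final (T : List Int) (k s idx c1 c2 : Int)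
    (hpre : (s = 0 ∧ c1 + c2 = k) ∨ (-(T.length : Int) ≤ idx ∧ idx ≤ (T.length : Int))) :
    equal_sum_of_elements T k s idx c1 c2 =
      (let p := (PySem.List.pyRange idx (T.length : Int) 1).foldl (esoeStep T k)
        (false, PySem.Set.ofList [(s, c1 + c2)])
       p.1 || PySem.Set.contains p.2 ((0 : Int), k)) := by
  by_cases hb : s = 0 ∧ c1 + c2 = k
  · obtain ⟨rfl, hk⟩ := hb
    have hA : equal_sum_of_elements T k 0 idx c1 c2 = true := by
      rw [equal_sum_of_elements]; simp [hk]
    rw [hA]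
    have hcon : PySem.Set.contains (PySem.Set.ofList [((0:Int), c1 + c2)]) ((0:Int), k) = true := by
      simp [hk]
    by_cases hei : (T.length : Int) ≤ idx
    · rw [PySem.List.pyRange_one_eq_nil hei]
      simpa using hcon
    · push_neg at hei
      rw [PySem.List.pyRange_one_cons hei]
      simp only [List.foldl_cons]
      have hst : esoeStep T k (false, PySem.Set.ofList [((0:Int), c1 + c2)]) idx =
          (true, PySem.Set.ofList [((0:Int), c1 + c2)]) := by
        simp [esoeStep, hk]
      rw [hst, eso_foldl_true]
      simp
  · have hrange : -(T.length : Int) ≤ idx ∧ idx ≤ (T.length : Int) := by tauto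
    rw [eso_loop T k _ idx rfl hrange.1]
    have hsing : PySem.Set.ofList [(s, c1 + c2)] = [(s, c1 + c2)] := by
      simp [PySem.Set.ofList_eq_self_of_nodup]
    rw [hsing]
    simp only [List.any_cons, List.any_nil, Bool.or_false]
    exact eso_count_merge T k _ s idx c1 c2 rfl

-- ===== VERDICT (by name: the statement is the Claim_ definition above) =====
theorem equal_sum_of_elements_spec : Claim_equal_equal_sum_of_elements := by
  intro T k s idx c1 c2 _ hpre
  unfold Pre_equal_sum_of_elements at hpre
  unfold Spec_equal_sum_of_elements equal_sum_of_elements_alt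
  exact eso_final T k s idx c1 c2 hpre
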